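-- pv_equiv track=rewrite | github.com/kendevv/ProgrammingProblem | Alphabet Soup/AlphabetSoup.py | alphabetSoup
-- ===== SOURCE A (Python) =====
-- def alphabetSoup (string):
--     liiiii = sorted(list(string))
--     lowerLi = sorted(list(string.lower()))
--     caps = []
--     newString = ''
--     for char in liiiii:
--         if char.isupper():
--             caps.append(char)
--     for letter in lowerLi:
--         if caps.count(letter.upper()) != 0:
--             newString += letter.upper()
--             caps.pop(caps.index(letter.upper()))
--         else:
--             newString += letter
--     return newString
-- ===== SOURCE B (Python) =====
-- def alphabetSoup(string):
--     # Counting-sort style: tally totals per lowercased character and uppercase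
--     # occurrences per letter, then emit one block per distinct character in
--     # sorted order: first its uppercase copies, then the lowercase rest.
--     total = {}
--     for ch in string.lower():
--         total[ch] = total.get(ch, 0) + 1
--     ups = {}
--     for ch in string:
--         if ch.isupper():
--             ups[ch] = ups.get(ch, 0) + 1
--     parts = []
--     for c in sorted(total):
--         u = ups.get(c.upper(), 0)
--         parts.append(c.upper() * u + c * (total[c] - u))
--     return ''.join(parts)
-- ===== Notes on version B (the rewrite author's own statement) =====
-- stated objective: faster
-- what changed: Counting-sort style rewrite: instead of walking the sorted lowercased string character by character while scanning/popping a caps list, B tallies totals per lowercased character and uppercase counts per letter in one pass each, then emits one block per distinct character in sorted key order (uppercase copies first, computed arithmetically).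
import Mathlib
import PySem

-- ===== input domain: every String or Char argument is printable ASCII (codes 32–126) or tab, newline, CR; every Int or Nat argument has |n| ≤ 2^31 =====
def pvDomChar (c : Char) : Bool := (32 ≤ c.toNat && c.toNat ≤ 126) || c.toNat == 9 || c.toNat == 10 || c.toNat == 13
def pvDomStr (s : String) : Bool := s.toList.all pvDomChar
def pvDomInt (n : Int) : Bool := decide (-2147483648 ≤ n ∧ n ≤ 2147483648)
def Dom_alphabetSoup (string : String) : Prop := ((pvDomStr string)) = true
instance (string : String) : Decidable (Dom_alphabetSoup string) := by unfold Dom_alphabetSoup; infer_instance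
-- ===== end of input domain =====

-- B is a counting-sort style rewrite (tallies per distinct character, blocks emitted in
-- sorted key order) replacing A's per-character walk over the sorted string with a
-- mutable caps list; proved to return the same string.

-- ===== PORT A =====
-- one iteration of A's second for-loop; state = (caps, newString as chars)
def pvAStep (st : List Char × List Char) (letter : Char) : List Char × List Char :=
  let u := PySem.Chars.upperChar letter
  if PySem.List.count st.1 u ≠ 0 then
    let caps' :=
      match PySem.List.index? st.1 u with
      | some i =>
        match PySem.List.pop? st.1 (i : Int) with
        | some r => r.2
        | none => st.1
      | none => st.1
    (caps', st.2 ++ [u])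
  else (st.1, st.2 ++ [letter])

def alphabetSoup (string : String) : String :=
  let liiiii := PySem.List.sorted string.toList (fun c => c) false
  let lowerLi := PySem.List.sorted (PySem.Str.lower string).toList (fun c => c) false
  let caps := liiiii.foldl (fun acc c => if PySem.Chars.isupper c then acc ++ [c] else acc) []
  String.ofList (lowerLi.foldl pvAStep (caps, [])).2

-- ===== PORT B =====
-- one iteration of Source B's block loop over the sorted distinct keys; Python's total[c]
-- is read only at keys c of total, where getD c 0 returns exactly the stored value
def pvBBlock (total ups : PySem.Dict Char Int) (parts : List (List Char)) (c : Char) :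
    List (List Char) :=
  parts ++ [PySem.List.pyRepeat [PySem.Chars.upperChar c] (ups.getD (PySem.Chars.upperChar c) 0) ++
            PySem.List.pyRepeat [c] (total.getD c 0 - ups.getD (PySem.Chars.upperChar c) 0)]

def alphabetSoup_alt (string : String) : String :=
  let total := (PySem.Str.lower string).toList.foldl
      (fun d ch => d.insert ch (d.getD ch 0 + 1)) (PySem.Dict.empty : PySem.Dict Char Int)
  let ups := string.toList.foldl
      (fun d ch => if PySem.Chars.isupper ch then d.insert ch (d.getD ch 0 + 1) else d)
      (PySem.Dict.empty : PySem.Dict Char Int)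
  let keys := PySem.List.sorted total.keys (fun c => c) false
  String.ofList (PySem.Chars.join [] (keys.foldl (pvBBlock total ups) []))

-- ===== PRECONDITION & SPEC =====
def Spec_alphabetSoup (string : String) (out : String) : Prop := out = alphabetSoup_alt string
instance (string : String) (out : String) : Decidable (Spec_alphabetSoup string out) := by unfold Spec_alphabetSoup; infer_instance

-- ===== CLAIM (what is proved, stated in full; the proofs are below) =====
def Claim_equal_alphabetSoup : Prop := ∀ (string : String), Dom_alphabetSoup string → Spec_alphabetSoup string (alphabetSoup string)

-- ===== LEMMAS AND PROOFS =====

-- Char arithmetic facts about PySem's ASCII case maps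
lemma pvChar_le_iff (c d : Char) : (c ≤ d) ↔ c.toNat ≤ d.toNat := by
  rw [Char.le_def]; exact UInt32.le_iff_toNat_le

lemma pvChar_eq_iff (c d : Char) : c = d ↔ c.toNat = d.toNat := by
  rw [Char.ext_iff]; exact UInt32.toNat_inj.symm

lemma pvOfNat_toNat (n : Nat) (h : n < 55296) : (Char.ofNat n).toNat = n := by
  rw [Char.toNat_ofNat]; simp [Nat.isValidChar, h]

lemma pv_isupper_iff (c : Char) :
    PySem.Chars.isupper c = true ↔ 65 ≤ c.toNat ∧ c.toNat ≤ 90 := by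
  simp [PySem.Chars.isupper, pvChar_le_iff]

lemma pv_islower_iff (c : Char) :
    PySem.Chars.islower c = true ↔ 97 ≤ c.toNat ∧ c.toNat ≤ 122 := by
  simp [PySem.Chars.islower, pvChar_le_iff]

lemma pv_upper_of_not_lower (c : Char) (h : PySem.Chars.islower c = false) :
    PySem.Chars.upperChar c = c := by
  simp [PySem.Chars.upperChar, h]

lemma pv_lower_of_not_upper (c : Char) (h : PySem.Chars.isupper c = false) :
    PySem.Chars.lowerChar c = c := by
  simp [PySem.Chars.lowerChar, h]

lemma pv_upper_toNat (c : Char) (h : PySem.Chars.islower c = true) :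
    (PySem.Chars.upperChar c).toNat = c.toNat - 32 := by
  have h' := (pv_islower_iff c).mp h
  simp only [PySem.Chars.upperChar, h, if_true]
  exact pvOfNat_toNat _ (by omega)

lemma pv_lower_toNat (c : Char) (h : PySem.Chars.isupper c = true) :
    (PySem.Chars.lowerChar c).toNat = c.toNat + 32 := by
  have h' := (pv_isupper_iff c).mp h
  simp only [PySem.Chars.lowerChar, h, if_true]
  exact pvOfNat_toNat _ (by omega)

lemma pv_lower_not_upper (x : Char) :
    PySem.Chars.isupper (PySem.Chars.lowerChar x) = false := by
  cases hx : PySem.Chars.isupper x with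
  | false => rw [pv_lower_of_not_upper x hx]; exact hx
  | true =>
    have h1 := (pv_isupper_iff x).mp hx
    have h2 := pv_lower_toNat x hx
    cases h3 : PySem.Chars.isupper (PySem.Chars.lowerChar x) with
    | false => rfl
    | true => have := (pv_isupper_iff _).mp h3; omega

lemma pv_lower_upper_fix (c : Char) (h : PySem.Chars.isupper c = false) :
    PySem.Chars.lowerChar (PySem.Chars.upperChar c) = c := by
  cases hl : PySem.Chars.islower c with
  | false => rw [pv_upper_of_not_lower c hl, pv_lower_of_not_upper c h]
  | true =>
    have hl' := (pv_islower_iff c).mp hl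
    have hU := pv_upper_toNat c hl
    have hUu : PySem.Chars.isupper (PySem.Chars.upperChar c) = true :=
      (pv_isupper_iff _).mpr (by omega)
    have hL := pv_lower_toNat _ hUu
    rw [pvChar_eq_iff]; omega

lemma pv_upper_inj (a b : Char) (ha : PySem.Chars.isupper a = false)
    (hb : PySem.Chars.isupper b = false)
    (h : PySem.Chars.upperChar a = PySem.Chars.upperChar b) : a = b := by
  have h1 := pv_lower_upper_fix a ha
  have h2 := pv_lower_upper_fix b hb
  rw [← h1, ← h2, h]

-- A's index-then-pop removal is erasure of the first occurrence
lemma pvA_remove_eq_erase (caps : List Char) (u : Char) (hu : u ∈ caps) :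
    (match PySem.List.index? caps u with
      | some i =>
        match PySem.List.pop? caps (i : Int) with
        | some r => r.2
        | none => caps
      | none => caps) = caps.erase u := by
  rcases h : PySem.List.index? caps u with _ | i
  · rw [PySem.List.index?_eq_none_iff] at h; exact absurd hu h
  · obtain ⟨hk, -, -⟩ := PySem.List.getElem_of_index?_eq_some h
    have he : caps.erase u = caps.eraseIdx i := by
      rw [List.erase_eq_eraseIdx]
      rw [PySem.List.index?_eq_idxOf?] at h
      simp [h]
    show (match PySem.List.pop? caps (i : Int) with
          | some r => r.2
          | none => caps) = caps.erase u
    rw [PySem.List.pop?_natCast caps i hk, he]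

-- A's inner loop over one block of n equal characters c: it first emits the remaining
-- uppercase copies, then lowercase; counts of other uppercase letters are untouched
lemma pv_block (c : Char) : ∀ (n : Nat) (caps acc : List Char),
    caps.count (PySem.Chars.upperChar c) ≤ n →
    (List.foldl pvAStep (caps, acc) (List.replicate n c)).2 =
        acc ++ List.replicate (caps.count (PySem.Chars.upperChar c)) (PySem.Chars.upperChar c)
            ++ List.replicate (n - caps.count (PySem.Chars.upperChar c)) c
    ∧ ∀ C', C' ≠ PySem.Chars.upperChar c →
      (List.foldl pvAStep (caps, acc) (List.replicate n c)).1.count C' = caps.count C' := by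
  intro n
  induction n with
  | zero =>
    intro caps acc h
    have h0 : caps.count (PySem.Chars.upperChar c) = 0 := Nat.le_zero.mp h
    simp [h0]
  | succ n ih =>
    intro caps acc h
    rw [List.replicate_succ, List.foldl_cons]
    set C := PySem.Chars.upperChar c with hC
    by_cases hm : C ∈ caps
    · have hpos : caps.count C ≠ 0 := by
        simpa [List.count_eq_zero] using hm
      have hstep : pvAStep (caps, acc) c = (caps.erase C, acc ++ [C]) := by
        have hc : PySem.List.count caps C ≠ 0 := by
          simpa [PySem.List.count_eq] using hpos
        simp only [pvAStep, ← hC, if_pos hc]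
        rw [pvA_remove_eq_erase caps C hm]
      rw [hstep]
      have hcnt : (caps.erase C).count C = caps.count C - 1 := List.count_erase_self
      have hle : (caps.erase C).count C ≤ n := by omega
      obtain ⟨h2, h1⟩ := ih (caps.erase C) (acc ++ [C]) hle
      constructor
      · rw [h2, hcnt]
        have hrep : List.replicate (caps.count C) C = C :: List.replicate (caps.count C - 1) C := by
          rw [← List.replicate_succ]
          congr 1
          omega
        rw [hrep]
        have : n + 1 - caps.count C = n - (caps.count C - 1) := by omega
        rw [this]
        simp
      · intro C' hC'
        rw [h1 C' hC', List.count_erase_of_ne hC']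
    · have h0 : caps.count C = 0 := List.count_eq_zero.mpr hm
      have hstep : pvAStep (caps, acc) c = (caps, acc ++ [c]) := by
        simp [pvAStep, ← hC, PySem.List.count_eq, h0]
      rw [hstep]
      obtain ⟨h2, h1⟩ := ih caps (acc ++ [c]) (by omega)
      constructor
      · rw [h2, h0]
        simp [List.replicate_succ]
      · exact h1

-- counting in a flatMap of replicate-blocks over distinct keys
lemma pv_count_flatMap (n : Char → Nat) (x : Char) : ∀ (K : List Char), K.Nodup →
    List.count x (K.flatMap (fun c => List.replicate (n c) c)) = if x ∈ K then n x else 0 := by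
  intro K
  induction K with
  | nil => intro _; simp
  | cons c rest ih =>
    intro hnd
    rw [List.nodup_cons] at hnd
    rw [List.flatMap_cons, List.count_append, ih hnd.2, List.count_replicate]
    by_cases hx : x = c
    · subst hx
      simp [hnd.1]
    · simp [hx, Ne.symm hx]

lemma pv_pairwise_flatMap (n : Char → Nat) : ∀ (K : List Char), K.Pairwise (· < ·) →
    (K.flatMap (fun c => List.replicate (n c) c)).Pairwise (· ≤ ·) := by
  intro K
  induction K with
  | nil => intro _; simp
  | cons c rest ih =>
    intro hp
    rw [List.pairwise_cons] at hp
    rw [List.flatMap_cons, List.pairwise_append]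
    refine ⟨List.pairwise_replicate.mpr (Or.inr le_rfl), ih hp.2, ?_⟩
    intro a ha b hb
    rw [List.eq_of_mem_replicate ha]
    obtain ⟨c', hc', hb'⟩ := List.mem_flatMap.mp hb
    rw [List.eq_of_mem_replicate hb']
    exact le_of_lt (hp.1 c' hc')

-- the sorted list decomposes into blocks of equal characters, one per sorted distinct key
lemma pv_group_decomp (low : List Char) :
    PySem.List.sorted low (fun x => x) false =
      (PySem.List.sorted (PySem.Set.ofList low) (fun x => x) false).flatMap
        (fun c => List.replicate (low.count c) c) := by
  apply PySem.List.sorted_id_eq_of_perm_of_pairwise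
  · rw [List.perm_iff_count]
    intro x
    have hnd : (PySem.List.sorted (PySem.Set.ofList low) (fun x => x) false).Nodup :=
      ((PySem.List.sorted_perm (PySem.Set.ofList low) (fun x => x) false).symm).nodup
        (PySem.Set.nodup_ofList low)
    rw [pv_count_flatMap _ _ _ hnd]
    by_cases hx : x ∈ low
    · have : x ∈ PySem.List.sorted (PySem.Set.ofList low) (fun x => x) false := by
        rw [PySem.List.mem_sorted, PySem.Set.mem_ofList]; exact hx
      simp [this]
    · have : x ∉ PySem.List.sorted (PySem.Set.ofList low) (fun x => x) false := by
        rw [PySem.List.mem_sorted, PySem.Set.mem_ofList]; exact hx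
      simp [this, List.count_eq_zero.mpr hx]
  · exact pv_pairwise_flatMap _ _ (PySem.List.sorted_ofList_pairwise_lt low)

-- A's whole second loop over the grouped sorted list produces B's blocks
lemma pv_groups (ucnt : Char → Nat) (nn : Char → Nat) :
    ∀ (K : List Char) (caps acc : List Char),
    K.Nodup → (∀ c ∈ K, PySem.Chars.isupper c = false) →
    (∀ c ∈ K, caps.count (PySem.Chars.upperChar c) = ucnt c) →
    (∀ c ∈ K, ucnt c ≤ nn c) →
    (List.foldl pvAStep (caps, acc) (K.flatMap (fun c => List.replicate (nn c) c))).2 =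
      acc ++ K.flatMap (fun c =>
        List.replicate (ucnt c) (PySem.Chars.upperChar c)
          ++ List.replicate (nn c - ucnt c) c) := by
  intro K
  induction K with
  | nil => intro caps acc _ _ _ _; simp
  | cons c rest ih =>
    intro caps acc hnd hlow hcnt hle
    rw [List.nodup_cons] at hnd
    rw [List.flatMap_cons, List.foldl_append]
    have hc : caps.count (PySem.Chars.upperChar c) = ucnt c := hcnt c (by simp)
    have hcle : caps.count (PySem.Chars.upperChar c) ≤ nn c := by
      rw [hc]; exact hle c (by simp)
    obtain ⟨h2, h1⟩ := pv_block c (nn c) caps acc hcle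
    set st1 := List.foldl pvAStep (caps, acc) (List.replicate (nn c) c) with hst1
    have hsplit : st1 = (st1.1, st1.2) := rfl
    rw [hsplit]
    rw [ih st1.1 st1.2 hnd.2 (fun c' hc' => hlow c' (by simp [hc']))
      (fun c' hc' => by
        rw [h1 (PySem.Chars.upperChar c') ?_, hcnt c' (by simp [hc'])]
        intro heq
        exact hnd.1 (by rw [pv_upper_inj c' c (hlow c' (by simp [hc'])) (hlow c (by simp)) heq] at hc'; exact hc')
      )
      (fun c' hc' => hle c' (by simp [hc']))]
    rw [h2, hc]
    simp [List.flatMap_cons]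

-- join with empty separator is flatten
lemma pv_join_nil_sep : ∀ (l : List (List Char)), PySem.Chars.join [] l = l.flatten := by
  intro l
  induction l with
  | nil => rfl
  | cons a t ih =>
    cases t with
    | nil => simp [PySem.Chars.join, List.intercalate]
    | cons b t' =>
      rw [PySem.Chars.join_cons_cons]
      rw [List.flatten_cons, ← ih]
      simp

-- ===== VERDICT (by name: the statement is the Claim_ definition above) =====
theorem alphabetSoup_spec : Claim_equal_alphabetSoup := by
  intro s _
  unfold Spec_alphabetSoup alphabetSoup alphabetSoup_alt
  simp only []
  set cs := s.toList with hcs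
  have hlow : (PySem.Str.lower s).toList = cs.map PySem.Chars.lowerChar := by
    rw [PySem.Str.toList_lower]; rfl
  set low := cs.map PySem.Chars.lowerChar with hlowdef
  set fcaps := cs.filter PySem.Chars.isupper with hfcaps
  rw [hlow]
  have htotal : List.foldl
      (fun (d : PySem.Dict Char Int) ch => d.insert ch (d.getD ch 0 + 1))
      PySem.Dict.empty low = PySem.Dict.counter low :=
    PySem.Dict.foldl_insert_getD_add_one_eq_counter low
  rw [htotal]
  have hups : List.foldl
      (fun (d : PySem.Dict Char Int) ch =>
        if PySem.Chars.isupper ch then d.insert ch (d.getD ch 0 + 1) else d)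
      PySem.Dict.empty cs = PySem.Dict.counter fcaps := by
    rw [PySem.List.foldl_if_eq_foldl_filter PySem.Chars.isupper
      (fun (d : PySem.Dict Char Int) ch => d.insert ch (d.getD ch 0 + 1)) cs PySem.Dict.empty]
    exact PySem.Dict.foldl_insert_getD_add_one_eq_counter _
  rw [hups, PySem.Dict.keys_counter]
  have hcapseq : List.foldl (fun acc c => if PySem.Chars.isupper c then acc ++ [c] else acc)
      ([] : List Char) (PySem.List.sorted cs (fun c => c) false)
      = (PySem.List.sorted cs (fun c => c) false).filter PySem.Chars.isupper := by
    rw [PySem.List.foldl_append_if_eq_filter PySem.Chars.isupper]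
    rfl
  rw [hcapseq]
  rw [pv_group_decomp low]
  congr 1
  set K := PySem.List.sorted (PySem.Set.ofList low) (fun x => x) false with hK
  have hKnd : K.Nodup :=
    ((PySem.List.sorted_perm (PySem.Set.ofList low) (fun x => x) false).symm).nodup
      (PySem.Set.nodup_ofList low)
  have hKlow : ∀ c ∈ K, PySem.Chars.isupper c = false := by
    intro c hcK
    rw [hK, PySem.List.mem_sorted, PySem.Set.mem_ofList] at hcK
    obtain ⟨x, -, hx⟩ := List.mem_map.mp hcK
    rw [← hx]
    exact pv_lower_not_upper x
  have hcaps_count : ∀ C : Char,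
      ((PySem.List.sorted cs (fun c => c) false).filter PySem.Chars.isupper).count C
        = fcaps.count C := by
    intro C
    exact ((PySem.List.sorted_perm cs (fun c => c) false).filter PySem.Chars.isupper).count_eq C
  have hle : ∀ c ∈ K, fcaps.count (PySem.Chars.upperChar c) ≤ low.count c := by
    intro c hcK
    have hcl := hKlow c hcK
    have h1 : fcaps.count (PySem.Chars.upperChar c) ≤ cs.count (PySem.Chars.upperChar c) := by
      rw [hfcaps]
      exact List.filter_sublist.count_le _
    have h2 : cs.count (PySem.Chars.upperChar c)
        ≤ List.countP (fun x => PySem.Chars.lowerChar x == c) cs := by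
      rw [List.count_eq_countP]
      apply List.countP_mono_left
      intro x _ hx
      rw [beq_iff_eq] at hx
      rw [beq_iff_eq, hx]
      exact pv_lower_upper_fix c hcl
    have h3 : low.count c = List.countP (fun x => PySem.Chars.lowerChar x == c) cs := by
      rw [hlowdef, List.count_eq_countP, List.countP_map]
      rfl
    omega
  rw [pv_groups (fun c => fcaps.count (PySem.Chars.upperChar c)) (fun c => low.count c) K
    _ [] hKnd hKlow (fun c _ => hcaps_count (PySem.Chars.upperChar c)) hle]
  rw [List.nil_append]
  have hBB : pvBBlock (PySem.Dict.counter low) (PySem.Dict.counter fcaps)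
      = fun (parts : List (List Char)) c => parts ++
        [PySem.List.pyRepeat [PySem.Chars.upperChar c]
            ((PySem.Dict.counter fcaps).getD (PySem.Chars.upperChar c) 0) ++
          PySem.List.pyRepeat [c]
            ((PySem.Dict.counter low).getD c 0
              - (PySem.Dict.counter fcaps).getD (PySem.Chars.upperChar c) 0)] := rfl
  rw [hBB]
  rw [PySem.List.foldl_append_singleton_eq_map
    (f := fun c => PySem.List.pyRepeat [PySem.Chars.upperChar c]
          ((PySem.Dict.counter fcaps).getD (PySem.Chars.upperChar c) 0)
        ++ PySem.List.pyRepeat [c]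
          ((PySem.Dict.counter low).getD c 0
            - (PySem.Dict.counter fcaps).getD (PySem.Chars.upperChar c) 0))]
  rw [List.nil_append, pv_join_nil_sep, ← List.flatMap_def]
  apply List.flatMap_congr
  intro c hcK
  rw [PySem.Dict.getD_counter, PySem.Dict.getD_counter, PySem.List.pyRepeat_singleton,
    PySem.List.pyRepeat_singleton]
  have e1 : ((fcaps.count (PySem.Chars.upperChar c) : Int)).toNat
      = fcaps.count (PySem.Chars.upperChar c) := by omega
  have e2 : ((low.count c : Int) - (fcaps.count (PySem.Chars.upperChar c) : Int)).toNat
      = low.count c - fcaps.count (PySem.Chars.upperChar c) := by omega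
  rw [e1, e2]
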